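-- pv_equiv track=rewrite | github.com/lskog7/python_projects_rep | algs/3F.py | shorten_text_based_on_dictionary
-- ===== SOURCE A (Python) =====
-- class TrieNode:
--     def __init__(self):
--         self.children = {}
--         self.end_of = False
--
-- def add_to_trie(root, word):
--     node = root
--     for char in word:
--         if char not in node.children:
--             node.children[char] = TrieNode()
--         node = node.children[char]
--     node.end_of = True
--
-- def find_shortest_matching_prefix(root, word):
--     node = root
--     prefix = ""
--     for char in word:
--         if char not in node.children:
--             break
--         node = node.children[char]
--         prefix += char
--         if node.end_of:
--             return prefix
--     return word
--
-- def shorten_text_based_on_dictionary(dictionary, text):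
--     root = TrieNode()
--     for word in dictionary:
--         add_to_trie(root, word)
--
--     shortened_text = []
--     for word in text:
--         prefix = find_shortest_matching_prefix(root, word)
--         shortened_text.append(prefix)
--
--     return " ".join(shortened_text)
-- ===== SOURCE B (Python) =====
-- def shorten_text_based_on_dictionary(dictionary, text):
--     roots = set(dictionary)
--     out = []
--     for word in text:
--         res = word
--         for i in range(1, len(word) + 1):
--             if word[:i] in roots:
--                 res = word[:i]
--                 break
--         out.append(res)
--     return " ".join(out)
-- ===== Notes on version B (the rewrite author's own statement) =====
-- stated objective: simpler
-- what changed: Replaces A's hand-built trie (node class, per-char insertion walk, child-dict descent) by a plain set of the dictionary roots probed with growing prefixes word[:i] for i = 1..len(word), taking the first hit.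
import Mathlib
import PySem

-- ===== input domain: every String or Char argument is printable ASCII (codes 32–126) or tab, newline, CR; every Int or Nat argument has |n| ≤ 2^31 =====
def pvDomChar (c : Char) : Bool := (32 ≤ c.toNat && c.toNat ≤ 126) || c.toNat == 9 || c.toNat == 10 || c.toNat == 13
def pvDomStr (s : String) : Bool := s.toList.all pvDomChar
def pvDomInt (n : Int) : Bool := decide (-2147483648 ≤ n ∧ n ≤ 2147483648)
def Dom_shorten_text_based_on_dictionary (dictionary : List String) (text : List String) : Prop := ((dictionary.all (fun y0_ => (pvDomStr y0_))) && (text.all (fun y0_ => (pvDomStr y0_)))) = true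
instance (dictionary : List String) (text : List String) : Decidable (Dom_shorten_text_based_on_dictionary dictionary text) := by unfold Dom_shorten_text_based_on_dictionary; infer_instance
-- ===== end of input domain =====

-- B replaces A's hand-built trie by a set of the roots probed with growing prefixes (simpler); return value only, no mutation observable.

-- ===== PORT A =====
-- A TrieNode has a dict {char: TrieNode} of children plus an end flag.  A nested
-- 'List (Char × PvTrie)' inside the constructor is not allowed, so the children
-- dict is encoded by the mutual type PvChildren; pvChildGet?/pvChildSet below are
-- exactly Dict.get?/Dict.insert (first-key lookup, in-place overwrite, append new)
-- hand-written for this encoding.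
mutual
inductive PvTrie where
  | mk : Bool → PvChildren → PvTrie
inductive PvChildren where
  | nil : PvChildren
  | cons : Char → PvTrie → PvChildren → PvChildren
end

-- children[c]  (none = 'c not in node.children')
def pvChildGet? (cs : PvChildren) (c : Char) : Option PvTrie :=
  match cs with
  | .nil => none
  | .cons c' t rest => if c = c' then some t else pvChildGet? rest c

-- children[c] = t  (dict insert: overwrite in place, else append)
def pvChildSet (cs : PvChildren) (c : Char) (t : PvTrie) : PvChildren :=
  match cs with
  | .nil => .cons c t .nil
  | .cons c' t' rest => if c = c' then .cons c' t rest else .cons c' t' (pvChildSet rest c t)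

-- add_to_trie: walk the word, creating missing children, set end_of at the end
def pvAddToTrie (t : PvTrie) (w : List Char) : PvTrie :=
  match w, t with
  | [], .mk _ cs => .mk true cs
  | c :: rest, .mk e cs =>
      let child := (pvChildGet? cs c).getD (.mk false .nil)
      .mk e (pvChildSet cs c (pvAddToTrie child rest))

-- find_shortest_matching_prefix: node walk with prefix accumulator; break → word
def pvFindAux (t : PvTrie) (rest : List Char) (pre : List Char) (word : List Char) : List Char :=
  match rest, t with
  | [], _ => word
  | c :: rs, .mk _ cs =>
      match pvChildGet? cs c with
      | none => word
      | some (.mk e' cs') =>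
          let pre' := pre ++ [c]
          if e' then pre' else pvFindAux (.mk e' cs') rs pre' word

def shorten_text_based_on_dictionary (dictionary : List String) (text : List String) : String :=
  let root := dictionary.foldl (fun r w => pvAddToTrie r w.toList) (.mk false .nil)
  let shortened := text.foldl
    (fun acc w => acc ++ [String.ofList (pvFindAux root w.toList [] w.toList)]) []
  PySem.Str.join " " shortened

-- ===== PORT B =====
-- the inner 'for i in range(1, len(word)+1): if word[:i] in roots: res = word[:i]; break'
-- (word[:i] with 0 ≤ i ≤ len(word) is exactly take i)
def pvAltLoop (roots : PySem.Set String) (w : List Char) (i n : Nat) : String :=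
  if i ≤ n then
    if PySem.Set.contains roots (String.ofList (w.take i)) then String.ofList (w.take i)
    else pvAltLoop roots w (i + 1) n
  else String.ofList w
termination_by n + 1 - i
decreasing_by omega

def shorten_text_based_on_dictionary_alt (dictionary : List String) (text : List String) : String :=
  let roots := PySem.Set.ofList dictionary
  let out := text.foldl
    (fun acc w => acc ++ [pvAltLoop roots w.toList 1 w.toList.length]) []
  PySem.Str.join " " out

-- ===== PRECONDITION & SPEC =====
def Spec_shorten_text_based_on_dictionary (dictionary : List String) (text : List String) (out : String) : Prop := out = shorten_text_based_on_dictionary_alt dictionary text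
instance (dictionary : List String) (text : List String) (out : String) : Decidable (Spec_shorten_text_based_on_dictionary dictionary text out) := by unfold Spec_shorten_text_based_on_dictionary; infer_instance

-- ===== CLAIM (what is proved, stated in full; the proofs are below) =====
def Claim_equal_shorten_text_based_on_dictionary : Prop := ∀ (dictionary : List String) (text : List String), Dom_shorten_text_based_on_dictionary dictionary text → Spec_shorten_text_based_on_dictionary dictionary text (shorten_text_based_on_dictionary dictionary text)

-- ===== LEMMAS AND PROOFS =====

-- which words a (sub)trie marks as ending here
def pvContainsT (t : PvTrie) (q : List Char) : Bool :=
  match q, t with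
  | [], .mk e _ => e
  | c :: r, .mk _ cs =>
      match pvChildGet? cs c with
      | none => false
      | some t' => pvContainsT t' r

-- the node reached by following a path
def pvPathT (t : PvTrie) (p : List Char) : Option PvTrie :=
  match p, t with
  | [], _ => some t
  | c :: r, .mk _ cs => (pvChildGet? cs c).bind (fun t' => pvPathT t' r)

theorem pvChildGet?_set (cs : PvChildren) (c c' : Char) (t : PvTrie) :
    pvChildGet? (pvChildSet cs c' t) c = if c = c' then some t else pvChildGet? cs c := by
  cases cs with
  | nil =>
      simp only [pvChildSet, pvChildGet?]
  | cons c0 t0 rest =>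
      simp only [pvChildSet]
      by_cases h0 : c' = c0
      · rw [if_pos h0]
        subst h0
        simp only [pvChildGet?]
        split_ifs <;> rfl
      · rw [if_neg h0]
        simp only [pvChildGet?, pvChildGet?_set rest c c' t]
        split_ifs <;> simp_all

theorem pvContainsT_empty (q : List Char) : pvContainsT (.mk false .nil) q = false := by
  cases q with
  | nil => rfl
  | cons c r => simp only [pvContainsT, pvChildGet?]

theorem pvContainsT_add (t : PvTrie) (w' q : List Char) :
    pvContainsT (pvAddToTrie t w') q = (decide (q = w') || pvContainsT t q) := by
  induction w' generalizing t q with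
  | nil =>
      obtain ⟨e, cs⟩ := t
      cases q with
      | nil => simp [pvAddToTrie, pvContainsT]
      | cons c r => simp [pvAddToTrie, pvContainsT]
  | cons c' r' ih =>
      obtain ⟨e, cs⟩ := t
      cases q with
      | nil => simp [pvAddToTrie, pvContainsT]
      | cons c r =>
          simp only [pvAddToTrie, pvContainsT, pvChildGet?_set]
          by_cases h : c = c'
          · subst h
            rw [if_pos rfl]
            simp only [ih]
            cases hg : pvChildGet? cs c with
            | none =>
                simp [Option.getD, pvContainsT_empty]
            | some t' =>
                simp [Option.getD]
          · rw [if_neg h]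
            have : (decide (c :: r = c' :: r')) = false := by
              simp [h]
            rw [this]
            simp

theorem pvContainsT_foldl (l : List String) (t : PvTrie) (q : List Char) :
    pvContainsT (l.foldl (fun r w => pvAddToTrie r w.toList) t) q
      = (l.any (fun d => decide (q = d.toList)) || pvContainsT t q) := by
  induction l generalizing t with
  | nil => simp
  | cons d l ih =>
      simp only [List.foldl_cons, List.any_cons, ih, pvContainsT_add]
      cases decide (q = d.toList) <;> simp

theorem pvPathT_snoc (t : PvTrie) (p : List Char) (c : Char) :
    pvPathT t (p ++ [c]) = (pvPathT t p).bind
      (fun t' => match t' with | .mk _ cs => pvChildGet? cs c) := by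
  induction p generalizing t with
  | nil =>
      obtain ⟨e, cs⟩ := t
      simp only [List.nil_append, pvPathT, Option.bind]
      cases pvChildGet? cs c <;> rfl
  | cons c0 r ih =>
      obtain ⟨e, cs⟩ := t
      simp only [List.cons_append, pvPathT]
      cases pvChildGet? cs c0 with
      | none => rfl
      | some t' => simp [Option.bind, ih]

theorem pvContainsT_path (root t : PvTrie) (p q : List Char) (h : pvPathT root p = some t) :
    pvContainsT root (p ++ q) = pvContainsT t q := by
  induction p generalizing root with
  | nil =>
      simp only [pvPathT, Option.some.injEq] at h
      subst h; rfl
  | cons c r ih =>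
      obtain ⟨e, cs⟩ := root
      simp only [pvPathT] at h
      cases hg : pvChildGet? cs c with
      | none => simp [hg] at h
      | some t' =>
          rw [hg] at h
          simp only [Option.bind] at h
          simp only [List.cons_append, pvContainsT, hg]
          exact ih t' h

theorem pvAltLoop_all_false (roots : PySem.Set String) (w : List Char) (i n : Nat)
    (h : ∀ j, i ≤ j → j ≤ n → PySem.Set.contains roots (String.ofList (w.take j)) = false) :
    pvAltLoop roots w i n = String.ofList w := by
  by_cases hle : i ≤ n
  · rw [pvAltLoop, if_pos hle, h i le_rfl hle]
    simp only [Bool.false_eq_true, if_false]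
    exact pvAltLoop_all_false roots w (i + 1) n (fun j hj1 hj2 => h j (by omega) hj2)
  · rw [pvAltLoop, if_neg hle]
termination_by n + 1 - i
decreasing_by omega

-- set membership agrees with trie membership
theorem pvMem (dictionary : List String) (q : List Char) :
    PySem.Set.contains (PySem.Set.ofList dictionary) (String.ofList q)
      = pvContainsT (dictionary.foldl (fun r w => pvAddToTrie r w.toList) (.mk false .nil)) q := by
  rw [pvContainsT_foldl, pvContainsT_empty, Bool.or_false]
  simp only [PySem.Set.contains, List.contains_eq_mem, PySem.Set.mem_ofList]
  by_cases h : String.ofList q ∈ dictionary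
  · rw [decide_eq_true h]
    symm
    simp only [List.any_eq_true, decide_eq_true_eq]
    exact ⟨String.ofList q, h, by simp⟩
  · rw [decide_eq_false h]
    symm
    simp only [List.any_eq_false, decide_eq_true_eq]
    intro d hd hq
    exact h (by rw [hq]; simpa using hd)

theorem pvMain (dictionary : List String) (rest pre : List Char) (t : PvTrie)
    (hpath : pvPathT (dictionary.foldl (fun r w => pvAddToTrie r w.toList) (.mk false .nil)) pre = some t) :
    String.ofList (pvFindAux t rest pre (pre ++ rest))
      = pvAltLoop (PySem.Set.ofList dictionary) (pre ++ rest) (pre.length + 1) (pre.length + rest.length) := by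
  induction rest generalizing pre t with
  | nil =>
      rw [pvFindAux, pvAltLoop, if_neg (by simp)]
  | cons c rs ih =>
      obtain ⟨e, cs⟩ := t
      have hcont : ∀ q, pvContainsT
          (dictionary.foldl (fun r w => pvAddToTrie r w.toList) (.mk false .nil)) (pre ++ q)
          = pvContainsT (.mk e cs) q :=
        fun q => pvContainsT_path _ _ _ _ hpath
      have htake : (pre ++ c :: rs).take (pre.length + 1) = pre ++ [c] := by
        rw [List.take_append]
        simp
      rw [pvFindAux, pvAltLoop, if_pos (by simp), htake, pvMem, hcont [c]]
      cases hg : pvChildGet? cs c with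
      | none =>
          have hfalse : pvContainsT (.mk e cs) [c] = false := by
            simp [pvContainsT, hg]
          rw [hfalse]
          simp only [Bool.false_eq_true, if_false]
          symm
          apply pvAltLoop_all_false
          intro j hj1 hj2
          have hjlen : pre.length + 1 ≤ j := by omega
          have htj : (pre ++ c :: rs).take j = pre ++ c :: rs.take (j - pre.length - 1) := by
            rw [List.take_append]
            congr 1
            · exact List.take_of_length_le (by omega)
            · have : j - pre.length = (j - pre.length - 1) + 1 := by omega
              rw [this, List.take_succ_cons]
              congr 2
          rw [htj, pvMem, hcont]
          simp [pvContainsT, hg]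
      | some t' =>
          obtain ⟨e', cs'⟩ := t'
          have he : pvContainsT (.mk e cs) [c] = e' := by
            simp [pvContainsT, hg]
          rw [he]
          cases e' with
          | true => simp
          | false =>
              simp only [Bool.false_eq_true, if_false]
              have hpath' : pvPathT
                  (dictionary.foldl (fun r w => pvAddToTrie r w.toList) (.mk false .nil))
                  (pre ++ [c]) = some (.mk false cs') := by
                rw [pvPathT_snoc, hpath]
                simp [Option.bind, hg]
              have := ih (pre ++ [c]) (.mk false cs') hpath'
              simp only [List.append_assoc, List.singleton_append, List.length_append,
                List.length_cons, List.length_nil] at this ⊢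
              rw [this]
              congr 1
              omega

-- ===== VERDICT (by name: the statement is the Claim_ definition above) =====
theorem shorten_text_based_on_dictionary_spec : Claim_equal_shorten_text_based_on_dictionary := by
  intro dictionary text _
  unfold Spec_shorten_text_based_on_dictionary
  unfold shorten_text_based_on_dictionary shorten_text_based_on_dictionary_alt
  simp only [PySem.List.foldl_append_singleton_eq_map, List.nil_append]
  congr 1
  refine List.map_congr_left (fun w _ => ?_)
  have := pvMain dictionary w.toList [] (dictionary.foldl (fun r w => pvAddToTrie r w.toList) (.mk false .nil)) rfl
  simpa using this
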